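-- pv_equiv track=rewrite | github.com/lhr0909/mcd-order-bot | actions/__init__.py | concatenate_items_naturally
-- ===== SOURCE A (Python) =====
-- from typing import Optional, List, Dict, Any
--
-- def concatenate_items_naturally(items: List[str]) -> str:
--     result = ''
--     for i, item in enumerate(items):
--         result += item
--         if i < len(items) - 2:
--             result += '，'
--         elif i < len(items) - 1:
--             result += '，还有'
--
--     return result
-- ===== SOURCE B (Python) =====
-- def concatenate_items_naturally(items):
--     # simpler: prefix-join + distinct last separator, no per-index branching
--     if not items:
--         return ''
--     init, last = items[:-1], items[-1]
--     if not init: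
--         return last
--     return '，'.join(init) + '，还有' + last
-- ===== Notes on version B (the rewrite author's own statement) =====
-- stated objective: simpler
-- what changed: Replaces the enumerate loop with per-index separator branches by a prefix/last partition: comma-join items[:-1], append the distinct '，还有' separator, then the last item.
import Mathlib
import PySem

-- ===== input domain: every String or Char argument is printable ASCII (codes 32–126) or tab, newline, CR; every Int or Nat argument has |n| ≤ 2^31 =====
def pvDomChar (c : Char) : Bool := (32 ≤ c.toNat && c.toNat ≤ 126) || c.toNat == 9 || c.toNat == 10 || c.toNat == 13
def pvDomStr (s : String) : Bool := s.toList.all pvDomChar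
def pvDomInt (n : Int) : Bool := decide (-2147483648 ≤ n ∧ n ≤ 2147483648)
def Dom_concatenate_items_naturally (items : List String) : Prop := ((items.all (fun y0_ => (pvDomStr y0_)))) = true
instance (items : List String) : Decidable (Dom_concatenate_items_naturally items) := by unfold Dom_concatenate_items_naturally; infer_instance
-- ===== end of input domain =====

-- ===== PORT A =====
-- transliteration of A: fold over enumerate(items), choosing the separator by index comparisons
def concatenate_items_naturally (items : List String) : String :=
  (PySem.List.enumerate items 0).foldl
    (fun result p =>
      let result := result ++ p.2
      if p.1 < (items.length : Int) - 2 then result ++ "，"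
      else if p.1 < (items.length : Int) - 1 then result ++ "，还有"
      else result) ""

-- ===== PORT B =====
-- transliteration of B: guard empty, split into items[:-1] and items[-1], comma-join the prefix
def concatenate_items_naturally_alt (items : List String) : String :=
  if items = [] then ""
  else
    let init := items.dropLast
    let last := items.getLast!
    if init = [] then last
    else PySem.Str.join "，" init ++ "，还有" ++ last

-- ===== PRECONDITION & SPEC =====
def Spec_concatenate_items_naturally (items : List String) (out : String) : Prop := out = concatenate_items_naturally_alt items
instance (items : List String) (out : String) : Decidable (Spec_concatenate_items_naturally items out) := by unfold Spec_concatenate_items_naturally; infer_instance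

-- ===== CLAIM (what is proved, stated in full; the proofs are below) =====
def Claim_equal_concatenate_items_naturally : Prop := ∀ (items : List String), Dom_concatenate_items_naturally items → Spec_concatenate_items_naturally items (concatenate_items_naturally items)

-- ===== LEMMAS AND PROOFS =====

theorem join_single (x : String) : PySem.Str.join "，" [x] = x := by
  rw [← String.toList_inj]
  simp [PySem.Str.toList_join, PySem.Chars.join, List.intercalate]

theorem join_cons (x y : String) (r : List String) :
    PySem.Str.join "，" (x :: y :: r) = x ++ "，" ++ PySem.Str.join "，" (y :: r) := by
  rw [← String.toList_inj]
  simp [PySem.Str.toList_join, PySem.Chars.join_cons_cons, String.toList_append]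

theorem alt_nil : concatenate_items_naturally_alt [] = "" := by
  simp [concatenate_items_naturally_alt]

theorem alt_single (x : String) : concatenate_items_naturally_alt [x] = x := by
  simp [concatenate_items_naturally_alt, List.getLast!]

theorem alt_pair (x y : String) :
    concatenate_items_naturally_alt [x, y] = x ++ "，还有" ++ y := by
  simp [concatenate_items_naturally_alt, List.getLast!, join_single]

theorem alt_cons3 (x y z : String) (t : List String) :
    concatenate_items_naturally_alt (x :: y :: z :: t) =
      x ++ "，" ++ concatenate_items_naturally_alt (y :: z :: t) := by
  simp only [concatenate_items_naturally_alt]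
  have h1 : (x :: y :: z :: t).dropLast = x :: (y :: z :: t).dropLast := rfl
  have h2 : (x :: y :: z :: t).getLast! = (y :: z :: t).getLast! := by
    simp [List.getLast!]
  have h3 : (y :: z :: t).dropLast = y :: (z :: t).dropLast := rfl
  simp only [h1, h2, h3, if_false, List.cons_ne_nil]
  rw [join_cons]
  simp [String.append_assoc]

-- A's fold, started at index s with acc accumulated, appends B's rendering of the rest:
-- the index tests s < n-2 / s < n-1 only depend on how many elements remain (n - s).
theorem foldA (xs : List String) : ∀ (s : Int) (acc : String) (n : Int),
    s + xs.length = n →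
    (PySem.List.enumerate xs s).foldl
      (fun result p =>
        let result := result ++ p.2
        if p.1 < n - 2 then result ++ "，"
        else if p.1 < n - 1 then result ++ "，还有"
        else result) acc
    = acc ++ concatenate_items_naturally_alt xs := by
  induction xs with
  | nil => intro s acc n h; simp [PySem.List.enumerate_nil, alt_nil]
  | cons x rest ih =>
    intro s acc n h
    rw [PySem.List.enumerate_cons, List.foldl_cons]
    match rest with
    | [] =>
      have hc1 : ¬ (s < n - 2) := by simp at h; omega
      have hc2 : ¬ (s < n - 1) := by simp at h; omega
      rw [ih (s+1) _ n (by simp at h ⊢; omega)]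
      simp only [hc1, hc2, if_false, alt_nil, alt_single]
      simp
    | [y] =>
      have hc1 : ¬ (s < n - 2) := by simp at h; omega
      have hc2 : s < n - 1 := by simp at h; omega
      rw [ih (s+1) _ n (by simp at h ⊢; omega)]
      simp only [hc1, hc2, if_false, if_true, alt_single, alt_pair]
      simp [String.append_assoc]
    | y :: z :: t =>
      have hc1 : s < n - 2 := by simp at h; omega
      rw [ih (s+1) _ n (by simp at h ⊢; omega)]
      simp only [hc1, if_true, alt_cons3]
      simp [String.append_assoc]

-- ===== VERDICT (by name: the statement is the Claim_ definition above) =====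
theorem concatenate_items_naturally_spec : Claim_equal_concatenate_items_naturally := by
  intro items _
  unfold Spec_concatenate_items_naturally concatenate_items_naturally
  rw [foldA items 0 "" (items.length : Int) (by simp)]
  simp
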